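-- pv_equiv track=rewrite | github.com/davidiach/erdos97 | scripts/search_new_patterns.py | cyclic_pattern
-- ===== SOURCE A (Python) =====
-- def cyclic_pattern(n, offsets):
--     S = []
--     for i in range(n):
--         row = sorted({(i + o) % n for o in offsets})
--         if i in row or len(row) != 4:
--             return None
--         S.append(row)
--     return S
-- ===== SOURCE B (Python) =====
-- def cyclic_pattern(n, offsets):
--     # Dedup/sort the offsets mod n once and validate once; each row of the answer
--     # is the sorted base shifted by i with the wrapped elements rotated to the
--     # front, and the wrap pattern only changes at 4 thresholds of i, so the rows
--     # are emitted segment by segment with 4 additions each (no per-row set/sort).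
--     if n <= 0:
--         return []
--     base = sorted({o % n for o in offsets})
--     if len(base) != 4:
--         return None
--     b0, b1, b2, b3 = base
--     if b0 == 0:
--         return None
--     S = [[b0 + i, b1 + i, b2 + i, b3 + i] for i in range(0, n - b3)]
--     S += [[b3 - n + i, b0 + i, b1 + i, b2 + i] for i in range(n - b3, n - b2)]
--     S += [[b2 - n + i, b3 - n + i, b0 + i, b1 + i] for i in range(n - b2, n - b1)]
--     S += [[b1 - n + i, b2 - n + i, b3 - n + i, b0 + i] for i in range(n - b1, n - b0)]
--     S += [[b0 - n + i, b1 - n + i, b2 - n + i, b3 - n + i] for i in range(n - b0, n)]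
--     return S
-- ===== Notes on version B (the rewrite author's own statement) =====
-- stated objective: alternative
-- what changed: Instead of building, deduplicating and sorting a residue set for every i, B deduplicates and sorts the offsets mod n once, validates size and fixed-point-freeness once on that base, and emits the rows segment by segment as wrap-rotated shifts of the base (4 additions per row, no per-row set or sort).
import Mathlib
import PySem

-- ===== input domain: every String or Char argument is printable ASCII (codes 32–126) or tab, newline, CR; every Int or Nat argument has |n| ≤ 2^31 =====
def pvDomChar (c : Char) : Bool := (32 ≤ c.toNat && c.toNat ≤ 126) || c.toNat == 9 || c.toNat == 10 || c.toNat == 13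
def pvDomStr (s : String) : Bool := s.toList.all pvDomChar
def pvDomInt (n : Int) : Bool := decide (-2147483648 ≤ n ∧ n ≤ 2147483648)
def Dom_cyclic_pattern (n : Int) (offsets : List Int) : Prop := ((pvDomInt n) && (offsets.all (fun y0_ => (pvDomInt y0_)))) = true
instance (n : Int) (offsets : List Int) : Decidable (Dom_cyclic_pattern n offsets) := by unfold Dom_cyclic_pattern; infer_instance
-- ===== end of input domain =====

-- B deduplicates/sorts the offsets mod n once and validates once, then emits each row as a
-- wrap-rotated shift of that base, segment by segment in i (no per-row set or sort).

-- ===== PORT A =====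
-- the loop 'for i in range(n)' with early 'return None'; one fuel unit per iteration
def cpGoA (n : Int) (offsets : List Int) : Nat → Int → List (List Int) → Option (List (List Int))
  | 0, _, S => some S
  | fuel + 1, i, S =>
    let row := PySem.List.sorted (PySem.Set.ofList (offsets.map (fun o => PySem.Int.mod (i + o) n))) (fun x => x) false
    if i ∈ row ∨ row.length ≠ 4 then none
    else cpGoA n offsets fuel (i + 1) (S ++ [row])

def cyclic_pattern (n : Int) (offsets : List Int) : Option (List (List Int)) :=
  cpGoA n offsets n.toNat 0 []

-- ===== PORT B =====
def cyclic_pattern_alt (n : Int) (offsets : List Int) : Option (List (List Int)) :=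
  if n ≤ 0 then some []
  else
    let base := PySem.List.sorted (PySem.Set.ofList (offsets.map (fun o => PySem.Int.mod o n))) (fun x => x) false
    if base.length ≠ 4 then none
    else
      match base with
      | b0 :: b1 :: b2 :: b3 :: _ =>
        if b0 = 0 then none
        else some (
          (PySem.List.pyRange 0 (n - b3) 1).map (fun i => [b0 + i, b1 + i, b2 + i, b3 + i]) ++
          (PySem.List.pyRange (n - b3) (n - b2) 1).map (fun i => [b3 - n + i, b0 + i, b1 + i, b2 + i]) ++
          (PySem.List.pyRange (n - b2) (n - b1) 1).map (fun i => [b2 - n + i, b3 - n + i, b0 + i, b1 + i]) ++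
          (PySem.List.pyRange (n - b1) (n - b0) 1).map (fun i => [b1 - n + i, b2 - n + i, b3 - n + i, b0 + i]) ++
          (PySem.List.pyRange (n - b0) n 1).map (fun i => [b0 - n + i, b1 - n + i, b2 - n + i, b3 - n + i]))
      | _ => none  -- unreachable: the length-4 check has already passed

-- ===== PRECONDITION & SPEC =====
def Spec_cyclic_pattern (n : Int) (offsets : List Int) (out : Option (List (List Int))) : Prop := out = cyclic_pattern_alt n offsets
instance (n : Int) (offsets : List Int) (out : Option (List (List Int))) : Decidable (Spec_cyclic_pattern n offsets out) := by unfold Spec_cyclic_pattern; infer_instance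

-- ===== CLAIM (what is proved, stated in full; the proofs are below) =====
def Claim_equal_cyclic_pattern : Prop := ∀ (n : Int) (offsets : List Int), Dom_cyclic_pattern n offsets → Spec_cyclic_pattern n offsets (cyclic_pattern n offsets)

-- ===== LEMMAS AND PROOFS =====

-- the sorted deduplicated base B computes once
def baseOf (n : Int) (offsets : List Int) : List Int :=
  PySem.List.sorted (PySem.Set.ofList (offsets.map (fun o => PySem.Int.mod o n))) (fun x => x) false

-- A's row for index i
def rowA (n : Int) (offsets : List Int) (i : Int) : List Int :=
  PySem.List.sorted (PySem.Set.ofList (offsets.map (fun o => PySem.Int.mod (i + o) n))) (fun x => x) false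

-- the sorted shift of the base by i: wrapped residues first
def altRow (n : Int) (base : List Int) (i : Int) : List Int :=
  (base.filter (fun b => decide (n ≤ b + i))).map (fun b => b + i - n) ++
  (base.filter (fun b => decide (b + i < n))).map (fun b => b + i)

lemma mem_baseOf {n : Int} {offsets : List Int} {x : Int} :
    x ∈ baseOf n offsets ↔ ∃ o ∈ offsets, PySem.Int.mod o n = x := by
  simp [baseOf, PySem.List.mem_sorted, PySem.Set.mem_ofList]

lemma baseOf_pairwise (n : Int) (offsets : List Int) :
    (baseOf n offsets).Pairwise (· < ·) := PySem.List.sorted_ofList_pairwise_lt _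

lemma baseOf_bounds {n : Int} (hn : 0 < n) {offsets : List Int} {x : Int}
    (hx : x ∈ baseOf n offsets) : 0 ≤ x ∧ x < n := by
  rcases mem_baseOf.1 hx with ⟨o, _, rfl⟩
  exact ⟨PySem.Int.mod_nonneg o hn, PySem.Int.mod_lt o hn⟩

lemma mod_split {n b i : Int} (hn : 0 < n) (hb0 : 0 ≤ b) (hbn : b < n) (hi0 : 0 ≤ i) (hin : i < n) :
    PySem.Int.mod (b + i) n = if b + i < n then b + i else b + i - n := by
  rw [PySem.Int.mod_eq_emod_of_pos hn]
  split_ifs with h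
  · exact Int.emod_eq_of_lt (by omega) h
  · rw [← Int.sub_emod_right (b + i) n]
    exact Int.emod_eq_of_lt (by omega) (by omega)

lemma mod_shift {n i o : Int} (hn : 0 < n) :
    PySem.Int.mod (i + o) n = PySem.Int.mod (PySem.Int.mod o n + i) n := by
  rw [PySem.Int.mod_eq_emod_of_pos hn, PySem.Int.mod_eq_emod_of_pos hn,
      PySem.Int.mod_eq_emod_of_pos hn, Int.add_emod, Int.add_emod (o % n) i, Int.emod_emod_of_dvd _ dvd_rfl]
  ring_nf

lemma altRow_pairwise {n : Int} (hn : 0 < n) {offsets : List Int} (i : Int) :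
    (altRow n (baseOf n offsets) i).Pairwise (· < ·) := by
  have hp := baseOf_pairwise n offsets
  unfold altRow
  refine List.pairwise_append.2 ⟨?_, ?_, ?_⟩
  · exact List.pairwise_map.2 ((hp.sublist List.filter_sublist).imp (by intros; omega))
  · exact List.pairwise_map.2 ((hp.sublist List.filter_sublist).imp (by intros; omega))
  · intro x hx y hy
    simp only [List.mem_map, List.mem_filter] at hx hy
    rcases hx with ⟨b1, ⟨hb1, h1⟩, rfl⟩
    rcases hy with ⟨b2, ⟨hb2, h2⟩, rfl⟩
    have := baseOf_bounds hn hb1; have := baseOf_bounds hn hb2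
    simp at h1 h2; omega

lemma mem_altRow {n : Int} (hn : 0 < n) {offsets : List Int} {i x : Int} (hi0 : 0 ≤ i) (hin : i < n) :
    x ∈ altRow n (baseOf n offsets) i ↔ ∃ o ∈ offsets, PySem.Int.mod (i + o) n = x := by
  unfold altRow
  simp only [List.mem_append, List.mem_map, List.mem_filter, decide_eq_true_eq]
  constructor
  · rintro (⟨b, ⟨hb, h⟩, rfl⟩ | ⟨b, ⟨hb, h⟩, rfl⟩) <;>
    · rcases mem_baseOf.1 hb with ⟨o, ho, rfl⟩
      refine ⟨o, ho, ?_⟩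
      have h1 := PySem.Int.mod_nonneg o hn
      have h2 := PySem.Int.mod_lt o hn
      rw [mod_shift hn, mod_split hn h1 h2 hi0 hin]
      split_ifs <;> omega
  · rintro ⟨o, ho, rfl⟩
    have hb : PySem.Int.mod o n ∈ baseOf n offsets := mem_baseOf.2 ⟨o, ho, rfl⟩
    have h1 := PySem.Int.mod_nonneg o hn
    have h2 := PySem.Int.mod_lt o hn
    rw [mod_shift hn, mod_split hn h1 h2 hi0 hin]
    by_cases h : PySem.Int.mod o n + i < n
    · exact Or.inr ⟨_, ⟨hb, by simpa using h⟩, by simp [h]⟩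
    · exact Or.inl ⟨_, ⟨hb, by simpa using h⟩, by simp [h]⟩

-- A's row equals the shifted base row for every i in range
lemma rowA_eq_altRow {n : Int} (hn : 0 < n) (offsets : List Int) {i : Int} (hi0 : 0 ≤ i) (hin : i < n) :
    rowA n offsets i = altRow n (baseOf n offsets) i := by
  unfold rowA
  refine PySem.List.sorted_eq_of_perm_of_pairwise_lt _ _ _ ?_ (altRow_pairwise hn i)
  refine List.perm_of_nodup_nodup_toFinset_eq ((altRow_pairwise hn i (offsets := offsets)).nodup) (PySem.Set.nodup_ofList _) ?_
  ext x
  simp only [List.mem_toFinset, PySem.Set.mem_ofList, List.mem_map]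
  rw [mem_altRow hn hi0 hin]

lemma length_altRow (n : Int) (base : List Int) (i : Int) :
    (altRow n base i).length = base.length := by
  unfold altRow
  rw [List.length_append, List.length_map, List.length_map]
  have heq : List.filter (fun b => decide (b + i < n)) base
      = List.filter (fun b => !decide (n ≤ b + i)) base := by
    apply List.filter_congr; intro b _; by_cases h : b + i < n <;> simp [h] <;> omega
  rw [heq]
  exact (List.length_eq_length_filter_add (fun b => decide (n ≤ b + i))).symm

lemma mem_self_rowA_iff {n : Int} (hn : 0 < n) (offsets : List Int) {i : Int} (hi0 : 0 ≤ i) (hin : i < n) :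
    i ∈ rowA n offsets i ↔ (0 : Int) ∈ baseOf n offsets := by
  rw [rowA_eq_altRow hn offsets hi0 hin, mem_altRow hn hi0 hin]
  constructor
  · rintro ⟨o, ho, h⟩
    have h1 := PySem.Int.mod_nonneg o hn
    have h2 := PySem.Int.mod_lt o hn
    rw [mod_shift hn, mod_split hn h1 h2 hi0 hin] at h
    have : PySem.Int.mod o n = 0 := by split_ifs at h <;> omega
    exact mem_baseOf.2 ⟨o, ho, this⟩
  · intro h0
    rcases mem_baseOf.1 h0 with ⟨o, ho, hoz⟩
    refine ⟨o, ho, ?_⟩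
    rw [mod_shift hn, hoz, mod_split hn le_rfl hn hi0 hin]
    simp [hin]

-- the good loop: every row valid, the loop appends the shifted rows
lemma cpGoA_good {n : Int} (hn : 0 < n) (offsets : List Int)
    (hlen : (baseOf n offsets).length = 4) (h0 : (0 : Int) ∉ baseOf n offsets) :
    ∀ (k : Nat) (i : Int) (acc : List (List Int)), 0 ≤ i → i + k = n →
    cpGoA n offsets k i acc
      = some (acc ++ (PySem.List.pyRange i n 1).map (altRow n (baseOf n offsets))) := by
  intro k
  induction k with
  | zero =>
    intro i acc hi0 hik
    rw [PySem.List.pyRange_one_eq_nil (by omega)]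
    simp [cpGoA]
  | succ m ih =>
    intro i acc hi0 hik
    have hin : i < n := by omega
    rw [PySem.List.pyRange_one_cons hin]
    have hrow : rowA n offsets i = altRow n (baseOf n offsets) i := rowA_eq_altRow hn offsets hi0 hin
    have hlenr : (altRow n (baseOf n offsets) i).length = 4 := by
      rw [length_altRow, hlen]
    have hmem : i ∉ rowA n offsets i := fun h => h0 ((mem_self_rowA_iff hn offsets hi0 hin).1 h)
    show (if i ∈ rowA n offsets i ∨ (rowA n offsets i).length ≠ 4 then none
          else cpGoA n offsets m (i + 1) (acc ++ [rowA n offsets i]))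
        = _
    rw [if_neg (by rw [hrow] at hmem; simp [hrow, hlenr]; exact fun h => absurd h hmem)]
    rw [hrow, ih (i + 1) (acc ++ [altRow n (baseOf n offsets) i]) (by omega) (by omega)]
    simp

-- the shifted rows, emitted segment by segment, are exactly B's five comprehensions
lemma map_altRow_segments {n b0 b1 b2 b3 : Int} (h01 : b0 < b1) (h12 : b1 < b2) (h23 : b2 < b3)
    (hb0 : 0 ≤ b0) (hb3 : b3 < n) :
    (PySem.List.pyRange 0 n 1).map (altRow n [b0, b1, b2, b3])
      = (PySem.List.pyRange 0 (n - b3) 1).map (fun i => [b0 + i, b1 + i, b2 + i, b3 + i]) ++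
        (PySem.List.pyRange (n - b3) (n - b2) 1).map (fun i => [b3 - n + i, b0 + i, b1 + i, b2 + i]) ++
        (PySem.List.pyRange (n - b2) (n - b1) 1).map (fun i => [b2 - n + i, b3 - n + i, b0 + i, b1 + i]) ++
        (PySem.List.pyRange (n - b1) (n - b0) 1).map (fun i => [b1 - n + i, b2 - n + i, b3 - n + i, b0 + i]) ++
        (PySem.List.pyRange (n - b0) n 1).map (fun i => [b0 - n + i, b1 - n + i, b2 - n + i, b3 - n + i]) := by
  rw [PySem.List.pyRange_one_append 0 (n - b3) n (by omega) (by omega),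
      PySem.List.pyRange_one_append (n - b3) (n - b2) n (by omega) (by omega),
      PySem.List.pyRange_one_append (n - b2) (n - b1) n (by omega) (by omega),
      PySem.List.pyRange_one_append (n - b1) (n - b0) n (by omega) (by omega)]
  simp only [List.map_append, List.append_assoc]
  congr 1
  · apply List.map_congr_left
    intro i hi
    rw [PySem.List.mem_pyRange_one] at hi
    have e0 : b0 + i < n := by omega
    have e1 : b1 + i < n := by omega
    have e2 : b2 + i < n := by omega
    have e3 : b3 + i < n := by omega
    simp [altRow, e0, e1, e2, e3, not_le.2 e0, not_le.2 e1, not_le.2 e2, not_le.2 e3]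
  congr 1
  · apply List.map_congr_left
    intro i hi
    rw [PySem.List.mem_pyRange_one] at hi
    have e0 : b0 + i < n := by omega
    have e1 : b1 + i < n := by omega
    have e2 : b2 + i < n := by omega
    have e3 : n ≤ b3 + i := by omega
    simp [altRow, e0, e1, e2, e3, not_le.2 e0, not_le.2 e1, not_le.2 e2, not_lt.2 e3]
    omega
  congr 1
  · apply List.map_congr_left
    intro i hi
    rw [PySem.List.mem_pyRange_one] at hi
    have e0 : b0 + i < n := by omega
    have e1 : b1 + i < n := by omega
    have e2 : n ≤ b2 + i := by omega
    have e3 : n ≤ b3 + i := by omega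
    simp [altRow, e0, e1, e2, e3, not_le.2 e0, not_le.2 e1, not_lt.2 e2, not_lt.2 e3]
    omega
  congr 1
  · apply List.map_congr_left
    intro i hi
    rw [PySem.List.mem_pyRange_one] at hi
    have e0 : b0 + i < n := by omega
    have e1 : n ≤ b1 + i := by omega
    have e2 : n ≤ b2 + i := by omega
    have e3 : n ≤ b3 + i := by omega
    simp [altRow, e0, e1, e2, e3, not_le.2 e0, not_lt.2 e1, not_lt.2 e2, not_lt.2 e3]
    omega
  · apply List.map_congr_left
    intro i hi
    rw [PySem.List.mem_pyRange_one] at hi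
    have e0 : n ≤ b0 + i := by omega
    have e1 : n ≤ b1 + i := by omega
    have e2 : n ≤ b2 + i := by omega
    have e3 : n ≤ b3 + i := by omega
    simp [altRow, e0, e1, e2, e3, not_lt.2 e0, not_lt.2 e1, not_lt.2 e2, not_lt.2 e3]
    omega

-- ===== VERDICT (by name: the statement is the Claim_ definition above) =====
theorem cyclic_pattern_spec : Claim_equal_cyclic_pattern := by
  intro n offsets _
  unfold Spec_cyclic_pattern cyclic_pattern cyclic_pattern_alt
  by_cases hn : n ≤ 0
  · have h0 : n.toNat = 0 := by omega
    rw [h0]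
    simp [cpGoA, hn]
  · have hn' : 0 < n := by omega
    rw [if_neg hn]
    obtain ⟨m, hm⟩ : ∃ m, n.toNat = m + 1 := ⟨n.toNat - 1, by omega⟩
    rw [hm]
    by_cases hlen : (baseOf n offsets).length = 4
    · obtain ⟨b0, b1, b2, b3, hb⟩ : ∃ b0 b1 b2 b3, baseOf n offsets = [b0, b1, b2, b3] := by
        rcases e : baseOf n offsets with _ | ⟨x0, _ | ⟨x1, _ | ⟨x2, _ | ⟨x3, _ | ⟨x4, t⟩⟩⟩⟩⟩ <;>
          rw [e] at hlen <;> simp at hlen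
        exact ⟨x0, x1, x2, x3, rfl⟩
      have hord := baseOf_pairwise n offsets
      rw [hb] at hord
      simp only [List.pairwise_cons, List.mem_cons] at hord
      have h01 : b0 < b1 := by tauto
      have h12 : b1 < b2 := by tauto
      have h23 : b2 < b3 := by tauto
      have hbd0 : 0 ≤ b0 ∧ b0 < n := baseOf_bounds hn' (by rw [hb]; simp)
      have hbd3 : 0 ≤ b3 ∧ b3 < n := baseOf_bounds hn' (by rw [hb]; simp)
      show cpGoA n offsets (m + 1) 0 [] =
        (if (baseOf n offsets).length ≠ 4 then none
         else match baseOf n offsets with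
           | b0 :: b1 :: b2 :: b3 :: _ =>
             if b0 = 0 then none
             else some (
               (PySem.List.pyRange 0 (n - b3) 1).map (fun i => [b0 + i, b1 + i, b2 + i, b3 + i]) ++
               (PySem.List.pyRange (n - b3) (n - b2) 1).map (fun i => [b3 - n + i, b0 + i, b1 + i, b2 + i]) ++
               (PySem.List.pyRange (n - b2) (n - b1) 1).map (fun i => [b2 - n + i, b3 - n + i, b0 + i, b1 + i]) ++
               (PySem.List.pyRange (n - b1) (n - b0) 1).map (fun i => [b1 - n + i, b2 - n + i, b3 - n + i, b0 + i]) ++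
               (PySem.List.pyRange (n - b0) n 1).map (fun i => [b0 - n + i, b1 - n + i, b2 - n + i, b3 - n + i]))
           | _ => none)
      rw [hb, if_neg (by simp [hb] at hlen ⊢)]
      by_cases h0 : b0 = 0
      · -- A fails at i = 0: 0 is a residue, so row 0 contains the fixed point 0
        have hmem : (0:Int) ∈ rowA n offsets 0 :=
          (mem_self_rowA_iff hn' offsets le_rfl hn').2 (by rw [hb, h0]; simp)
        show (if (0:Int) ∈ rowA n offsets 0 ∨ (rowA n offsets 0).length ≠ 4 then none
              else cpGoA n offsets m (0 + 1) ([] ++ [rowA n offsets 0])) = _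
        rw [if_pos (Or.inl hmem)]
        simp [h0]
      · -- every row is valid: the loop appends all n shifted rows
        have hz : (0 : Int) ∉ baseOf n offsets := by
          rw [hb]; simp; omega
        have hgood := cpGoA_good hn' offsets (by rw [hb]; rfl) hz (m + 1) 0 [] le_rfl (by omega)
        rw [hgood, hb, map_altRow_segments h01 h12 h23 hbd0.1 hbd3.2]
        simp [h0]
    · -- A fails at i = 0: the deduplicated residue row has the wrong size
      have hlenr : (rowA n offsets 0).length = (baseOf n offsets).length := by
        rw [rowA_eq_altRow hn' offsets le_rfl hn', length_altRow]
      show (if (0:Int) ∈ rowA n offsets 0 ∨ (rowA n offsets 0).length ≠ 4 then none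
            else cpGoA n offsets m (0 + 1) ([] ++ [rowA n offsets 0])) =
        (if (baseOf n offsets).length ≠ 4 then none
         else match baseOf n offsets with
           | b0 :: _ :: _ :: _ :: _ =>
             if b0 = 0 then none
             else some _
           | _ => none)
      rw [if_pos (Or.inr (by rw [hlenr]; exact hlen)), if_pos (by simp [hlen])]
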